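-- pv_equiv track=rewrite | github.com/Xiuyuan7/Python-Code-Run-Test | 面经题测试/Circle OA/remove_obstacles_to_let_figure_fall.py | solution
-- ===== SOURCE A (Python) =====
-- def solution(board):
--     row_cnt = len(board)
--     col_cnt = len(board[0])
--     lowest_row = get_lowest_row(board)
--     falling_distance = row_cnt - lowest_row - 1
--
--     min_removed = 0
--     for row in range(row_cnt):
--         for col in range(col_cnt):
--             if board[row][col] == '*':
--                 for i in range(1, falling_distance + 1):
--                     if board[row + i][col] == '#':
--                         min_removed += 1
--                     elif board[row + i][col] == '*':
--                         break
--     return min_removed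
--
-- def get_lowest_row(board):
--     row_cnt = len(board)
--     col_cnt = len(board[0])
--     for row in range(row_cnt - 1, -1, -1):
--         for col in range(col_cnt):
--             if board[row][col] == '*':
--                 return row
--     return -1
-- ===== SOURCE B (Python) =====
-- def solution(board):
--     # One pass per column: a '#' cell is removed iff the nearest '*' above it
--     # (in its column) is within the falling distance.
--     rows = len(board)
--     cols = len(board[0])
--     lowest = -1
--     for r in range(rows):
--         if '*' in board[r][:cols]:
--             lowest = r
--     fd = rows - lowest - 1
--     total = 0
--     for c in range(cols):
--         last = None
--         cnt = 0
--         for r in range(rows):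
--             ch = board[r][c]
--             if ch == '*':
--                 last = r
--             elif ch == '#' and last is not None and r - last <= fd:
--                 cnt += 1
--         total += cnt
--     return total
-- ===== Notes on version B (the rewrite author's own statement) =====
-- stated objective: faster
-- what changed: Instead of rescanning up to falling_distance rows below every '*' cell, B makes one top-down pass per column tracking the nearest '*' above and counts each '#' cell whose nearest star above is within the falling distance.
import Mathlib
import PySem

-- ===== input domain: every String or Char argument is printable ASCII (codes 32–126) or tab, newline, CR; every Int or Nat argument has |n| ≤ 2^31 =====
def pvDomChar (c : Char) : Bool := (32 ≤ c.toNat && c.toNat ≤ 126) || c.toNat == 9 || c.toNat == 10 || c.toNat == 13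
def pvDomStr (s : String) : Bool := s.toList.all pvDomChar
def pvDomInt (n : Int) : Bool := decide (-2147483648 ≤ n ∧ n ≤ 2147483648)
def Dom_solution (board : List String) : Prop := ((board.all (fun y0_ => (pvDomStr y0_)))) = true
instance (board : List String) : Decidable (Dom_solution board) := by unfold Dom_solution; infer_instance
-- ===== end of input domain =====

-- B is a single top-down pass per column (a '#' falls iff its nearest '*' above is within
-- falling distance) instead of A's rescan below every '*'; equivalence of return values is proved on Pre_.

-- board[r][c], totalized: an out-of-range read yields ' ' (Python raises there; Pre_ excludes those inputs)
def pvCell (board : List String) (r c : Nat) : Char := ((board.getD r "").toList).getD c ' '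

-- ===== PORT A =====
-- inner loop of get_lowest_row: 'for col in range(col_cnt): if … == '*': return row'
def pvRowHasStar (board : List String) (colCnt r : Nat) : Bool :=
  (List.range colCnt).any (fun c => pvCell board r c == '*')

-- outer loop of get_lowest_row over range(row_cnt-1, -1, -1), first match returns
def pvGLRAux (board : List String) (colCnt : Nat) : List Nat → Int
  | [] => -1
  | r :: rest => if pvRowHasStar board colCnt r then (r : Int) else pvGLRAux board colCnt rest

def getLowestRow (board : List String) : Int :=
  pvGLRAux board (board.headD "").length (List.range board.length).reverse

-- 'for i in range(1, falling_distance+1): … break' — recursion on the remaining iterations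
def pvScanA (board : List String) (col : Nat) : Nat → Nat → Int
  | _, 0 => 0
  | r, Nat.succ k =>
    if pvCell board r col = '#' then 1 + pvScanA board col (r+1) k
    else if pvCell board r col = '*' then 0
    else pvScanA board col (r+1) k

def solution (board : List String) : Int :=
  let rowCnt := board.length
  let colCnt := (board.headD "").length
  let lowest := getLowestRow board
  -- falling_distance = row_cnt - lowest_row - 1 is always ≥ 0, so .toNat is exact
  let fd : Nat := ((rowCnt : Int) - lowest - 1).toNat
  (List.range rowCnt).foldl (fun acc row =>
    (List.range colCnt).foldl (fun acc col =>
      if pvCell board row col = '*' then acc + pvScanA board col (row+1) fd else acc) acc) 0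

-- ===== PORT B =====
-- "'*' in board[r][:cols]" folded forward, keeping the last row that contains a star
def pvLowestFwd (board : List String) (cols : Nat) : Int :=
  (List.range board.length).foldl
    (fun acc r => if ((board.getD r "").toList.take cols).contains '*' then (r : Int) else acc) (-1)

-- one top-down pass over a column with state (last star row, count)
def pvColPass (board : List String) (rows : Nat) (fd : Int) (c : Nat) : Int :=
  ((List.range rows).foldl (fun (st : Option Nat × Int) r =>
      if pvCell board r c = '*' then (some r, st.2)
      else match st.1 with
        | some l => if pvCell board r c = '#' ∧ (r : Int) - (l : Int) ≤ fd then (some l, st.2 + 1) else st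
        | none => st) (none, 0)).2

def solution_alt (board : List String) : Int :=
  let rows := board.length
  let cols := (board.headD "").length
  let lowest := pvLowestFwd board cols
  let fd : Int := (rows : Int) - lowest - 1
  (List.range cols).foldl (fun total c => total + pvColPass board rows fd c) 0

-- ===== PRECONDITION & SPEC =====
-- Python A raises IndexError on an empty board (board[0]) and whenever some row is shorter
-- than the first row (board[row][col] for col < len(board[0])); exactly those are excluded.
def Pre_solution (board : List String) : Prop :=
  board ≠ [] ∧ ∀ s ∈ board, (board.headD "").length ≤ s.length

instance (board : List String) : Decidable (Pre_solution board) := by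
  unfold Pre_solution; infer_instance

def pvWitness_solution : List String := ["*.", "##"]

def Spec_solution (board : List String) (out : Int) : Prop := out = solution_alt board
instance (board : List String) (out : Int) : Decidable (Spec_solution board out) := by unfold Spec_solution; infer_instance

-- ===== CLAIM (what is proved, stated in full; the proofs are below) =====
def Claim_equal_solution : Prop := ∀ (board : List String), Dom_solution board → Pre_solution board → Spec_solution board (solution board)

-- ===== LEMMAS AND PROOFS =====

-- membership of '*' in the first `cols` chars equals the indexed any-scan
lemma contains_take_eq_any (cols : Nat) (s : List Char) :
    (s.take cols).contains '*' = (List.range cols).any (fun c => s.getD c ' ' == '*') := by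
  rw [Bool.eq_iff_iff]
  simp only [List.contains_eq_mem, List.any_eq_true, List.mem_range, beq_iff_eq,
    List.mem_take_iff_getElem, List.getD_eq_getElem?_getD, decide_eq_true_eq]
  constructor
  · rintro ⟨j, hm, hget⟩
    exact ⟨j, by omega, by rw [List.getElem?_eq_getElem (by omega), hget]; rfl⟩
  · rintro ⟨c, hc, hget⟩
    by_cases hlen : c < s.length
    · rw [List.getElem?_eq_getElem hlen] at hget
      exact ⟨c, by omega, by simpa using hget⟩
    · rw [List.getElem?_eq_none (by omega)] at hget
      exact absurd hget (by decide)

-- first-match scan over the reversed range = fold keeping the last match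
lemma glr_eq_fold (board : List String) (cols : Nat) (n : Nat) :
    pvGLRAux board cols (List.range n).reverse
      = (List.range n).foldl (fun acc r => if pvRowHasStar board cols r then (r : Int) else acc) (-1) := by
  induction n with
  | zero => simp [pvGLRAux]
  | succ m ih =>
    rw [List.range_succ, List.reverse_append, List.foldl_append]
    simp [pvGLRAux, ih]

lemma lowest_eq (board : List String) :
    getLowestRow board = pvLowestFwd board (board.headD "").length := by
  unfold getLowestRow pvLowestFwd
  rw [glr_eq_fold]
  congr 1
  funext acc r
  rw [contains_take_eq_any]
  rfl

-- the lowest row is -1 or a valid row index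
lemma lowest_range (board : List String) (cols : Nat) :
    pvLowestFwd board cols = -1 ∨
      (0 ≤ pvLowestFwd board cols ∧ pvLowestFwd board cols < (board.length : Int)) := by
  unfold pvLowestFwd
  have h : ∀ (l : List Nat) (init : Int),
      (∀ r ∈ l, r < board.length) →
      (init = -1 ∨ (0 ≤ init ∧ init < (board.length : Int))) →
      (l.foldl (fun acc r => if ((board.getD r "").toList.take cols).contains '*' then (r : Int) else acc) init = -1 ∨
        (0 ≤ l.foldl (fun acc r => if ((board.getD r "").toList.take cols).contains '*' then (r : Int) else acc) init ∧
         l.foldl (fun acc r => if ((board.getD r "").toList.take cols).contains '*' then (r : Int) else acc) init < (board.length : Int))) := by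
    intro l
    induction l with
    | nil => intro init _ h0; exact h0
    | cons a t ih =>
      intro init hmem h0
      simp only [List.foldl_cons]
      apply ih
      · intro r hr; exact hmem r (List.mem_cons_of_mem _ hr)
      · split
        · right
          have := hmem a (List.mem_cons_self)
          constructor <;> omega
        · exact h0
  exact h _ _ (by intro r hr; exact List.mem_range.mp hr) (Or.inl rfl)

-- a scan that starts at or below the bottom row counts nothing
lemma scan_past_end (board : List String) (col : Nat) (b r : Nat) (h : board.length ≤ r) :
    pvScanA board col r b = 0 := by
  induction b generalizing r with
  | zero => rfl
  | succ k ih =>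
    have hc : pvCell board r col = ' ' := by
      unfold pvCell
      rw [List.getD_eq_default _ _ h]
      simp [List.getD]
    simp [pvScanA, hc, ih (r+1) (by omega)]

-- step function of B's column pass, with the falling distance as a Nat
def pvStep (board : List String) (c : Nat) (fdN : Nat) (st : Option Nat × Int) (r : Nat) : Option Nat × Int :=
  if pvCell board r c = '*' then (some r, st.2)
  else match st.1 with
    | some l => if pvCell board r c = '#' ∧ (r : Int) - (l : Int) ≤ (fdN : Int) then (some l, st.2 + 1) else st
    | none => st

-- per-row contribution of A's scan in column c
def pvTerm (board : List String) (c : Nat) (fdN : Nat) (t : Nat) : Int :=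
  if pvCell board t c = '*' then pvScanA board c (t+1) fdN else 0

lemma master_some (board : List String) (c fdN : Nat) :
    ∀ (m r l : Nat) (acc : Int), l < r → r + m = board.length →
      ((List.range' r m).foldl (pvStep board c fdN) (some l, acc)).2
        = acc + pvScanA board c r ((fdN + 1) - (r - l)) + ((List.range' r m).map (pvTerm board c fdN)).sum := by
  intro m
  induction m with
  | zero =>
    intro r l acc hl hr
    simp [scan_past_end board c _ r (by omega)]
  | succ k ih =>
    intro r l acc hl hr
    rw [List.range'_succ]
    simp only [List.foldl_cons, List.map_cons, List.sum_cons]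
    by_cases hs : pvCell board r c = '*'
    · rw [show pvStep board c fdN (some l, acc) r = (some r, acc) by simp [pvStep, hs]]
      rw [ih (r+1) r acc (by omega) (by omega)]
      have h0 : pvScanA board c r ((fdN + 1) - (r - l)) = 0 := by
        cases hb : (fdN + 1) - (r - l) with
        | zero => rfl
        | succ j => simp [pvScanA, hs]
      have h1 : (fdN + 1) - ((r+1) - r) = fdN := by omega
      rw [h1]
      simp [pvTerm, hs, h0]
      ring
    · by_cases hh : pvCell board r c = '#' ∧ (r : Int) - (l : Int) ≤ (fdN : Int)
      · rw [show pvStep board c fdN (some l, acc) r = (some l, acc + 1) from by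
          simp only [pvStep, if_neg hs]; exact if_pos hh]
        rw [ih (r+1) l (acc+1) (by omega) (by omega)]
        have hb : (fdN + 1) - (r - l) = ((fdN + 1) - ((r+1) - l)) + 1 := by omega
        rw [hb]
        simp [pvScanA, hh.1, pvTerm]
        ring
      · rw [show pvStep board c fdN (some l, acc) r = (some l, acc) from by
          simp only [pvStep, if_neg hs]; exact if_neg hh]
        rw [ih (r+1) l acc (by omega) (by omega)]
        by_cases hle : r - l ≤ fdN
        · have hb : (fdN + 1) - (r - l) = ((fdN + 1) - ((r+1) - l)) + 1 := by omega
          have hnum : ¬ pvCell board r c = '#' := by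
            intro hc; exact hh ⟨hc, by omega⟩
          rw [hb]
          simp [pvScanA, hnum, hs, pvTerm]
        · have hb1 : (fdN + 1) - (r - l) = 0 := by omega
          have hb2 : (fdN + 1) - ((r+1) - l) = 0 := by omega
          rw [hb1, hb2]
          simp [pvScanA, pvTerm, hs]

lemma master_none (board : List String) (c fdN : Nat) :
    ∀ (m r : Nat) (acc : Int), r + m = board.length →
      ((List.range' r m).foldl (pvStep board c fdN) (none, acc)).2
        = acc + ((List.range' r m).map (pvTerm board c fdN)).sum := by
  intro m
  induction m with
  | zero => intro r acc hr; simp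
  | succ k ih =>
    intro r acc hr
    rw [List.range'_succ]
    simp only [List.foldl_cons, List.map_cons, List.sum_cons]
    by_cases hs : pvCell board r c = '*'
    · rw [show pvStep board c fdN (none, acc) r = (some r, acc) by simp [pvStep, hs]]
      rw [master_some board c fdN k (r+1) r acc (by omega) (by omega)]
      have h1 : (fdN + 1) - ((r+1) - r) = fdN := by omega
      rw [h1]
      simp [pvTerm, hs]
      ring
    · rw [show pvStep board c fdN (none, acc) r = (none, acc) by simp [pvStep, hs]]
      rw [ih (r+1) acc (by omega)]
      simp [pvTerm, hs]

-- B's column pass = sum of A's per-star scans in that column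
lemma colPass_eq (board : List String) (c fdN : Nat) :
    pvColPass board board.length (fdN : Int) c
      = ((List.range board.length).map (pvTerm board c fdN)).sum := by
  unfold pvColPass
  rw [show (fun (st : Option Nat × Int) r =>
      if pvCell board r c = '*' then (some r, st.2)
      else match st.1 with
        | some l => if pvCell board r c = '#' ∧ (r : Int) - (l : Int) ≤ (fdN : Int) then (some l, st.2 + 1) else st
        | none => st) = pvStep board c fdN from rfl]
  rw [List.range_eq_range']
  rw [master_none board c fdN board.length 0 0 (by omega)]
  rw [← List.range_eq_range']
  ring

-- list-sum swap
lemma sum_swap (f : Nat → Nat → Int) (l1 l2 : List Nat) :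
    (l1.map (fun x => (l2.map (f x)).sum)).sum = (l2.map (fun y => (l1.map (fun x => f x y)).sum)).sum := by
  induction l1 with
  | nil => simp
  | cons a t ih =>
    simp only [List.map_cons, List.sum_cons, ih]
    rw [← List.sum_map_add]

lemma foldl_if_add (p : Nat → Prop) [DecidablePred p] (g : Nat → Int) (l : List Nat) (a : Int) :
    l.foldl (fun acc x => if p x then acc + g x else acc) a = a + (l.map (fun x => if p x then g x else 0)).sum := by
  induction l generalizing a with
  | nil => simp
  | cons b t ih =>
    simp only [List.foldl_cons, List.map_cons, List.sum_cons, ih]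
    split <;> ring

lemma foldl_plus (g : Nat → Int) (l : List Nat) (a : Int) :
    l.foldl (fun acc x => acc + g x) a = a + (l.map g).sum := by
  induction l generalizing a with
  | nil => simp
  | cons b t ih => simp only [List.foldl_cons, List.map_cons, List.sum_cons, ih]; ring

-- ===== VERDICT (by name: the statement is the Claim_ definition above) =====
theorem solution_spec : Claim_equal_solution := by
  intro board _ _
  unfold Spec_solution solution solution_alt
  dsimp only
  rw [lowest_eq board]
  have hfd0 : 0 ≤ (board.length : Int) - pvLowestFwd board (board.headD "").length - 1 := by
    rcases lowest_range board (board.headD "").length with h | ⟨h1, h2⟩ <;> omega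
  have hcast : (board.length : Int) - pvLowestFwd board (board.headD "").length - 1
      = ((((board.length : Int) - pvLowestFwd board (board.headD "").length - 1).toNat : Nat) : Int) :=
    (Int.toNat_of_nonneg hfd0).symm
  set fdN : Nat := (((board.length : Int) - pvLowestFwd board (board.headD "").length - 1)).toNat with hfdN
  rw [hcast]
  -- rewrite B's side into the per-column sums of A's per-star scans
  rw [show (fun (total : Int) c => total + pvColPass board board.length ((fdN : Nat) : Int) c)
      = (fun (total : Int) c => total + ((List.range board.length).map (pvTerm board c fdN)).sum) from by
    funext total c; rw [colPass_eq]]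
  rw [foldl_plus (fun c => ((List.range board.length).map (pvTerm board c fdN)).sum)]
  -- rewrite A's side into a double sum
  rw [show (fun (acc : Int) row => (List.range (board.headD "").length).foldl
        (fun acc col => if pvCell board row col = '*' then acc + pvScanA board col (row+1) fdN else acc) acc)
      = (fun (acc : Int) row => acc + ((List.range (board.headD "").length).map
          (fun col => pvTerm board col fdN row)).sum) from by
    funext acc row
    rw [foldl_if_add (fun col => pvCell board row col = '*') (fun col => pvScanA board col (row+1) fdN)]
    rfl]
  rw [foldl_plus (fun row => ((List.range (board.headD "").length).map (fun col => pvTerm board col fdN row)).sum)]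
  simpa using sum_swap (fun row col => pvTerm board col fdN row) (List.range board.length) (List.range (board.headD "").length)
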